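-- pv_equiv track=rewrite | github.com/athulya-anil/Agentic-GraphRAG | src/agents/conflict_resolution_agent.py | _are_name_variations
-- ===== SOURCE A (Python) =====
-- def _are_name_variations(name1: str, name2: str) -> bool:
--     """Check if names are common variations."""
--     # Common abbreviations and variations
--     variations = {
--         ('usa', 'united states', 'united states of america'),
--         ('uk', 'united kingdom', 'great britain'),
--         ('ny', 'new york'),
--         ('ca', 'california'),
--         ('dr', 'doctor'),
--         ('prof', 'professor'),
--     }
--
--     for variation_set in variations:
--         if name1 in variation_set and name2 in variation_set:
--             return True
--
--     return False
-- ===== SOURCE B (Python) =====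
-- _VARIATION_GROUPS = [
--     ('usa', 'united states', 'united states of america'),
--     ('uk', 'united kingdom', 'great britain'),
--     ('ny', 'new york'),
--     ('ca', 'california'),
--     ('dr', 'doctor'),
--     ('prof', 'professor'),
-- ]
--
-- # index built once: each name -> integer id of its group
-- _NAME_TO_GROUP = {name: gid
--                   for gid, group in enumerate(_VARIATION_GROUPS)
--                   for name in group}
--
--
-- def _are_name_variations(name1: str, name2: str) -> bool:
--     """Check if names are common variations."""
--     g1 = _NAME_TO_GROUP.get(name1)
--     return g1 is not None and g1 == _NAME_TO_GROUP.get(name2)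
-- ===== Notes on version B (the rewrite author's own statement) =====
-- stated objective: idiomatic
-- what changed: Replaces the per-call scan over variation groups (joint membership test in each tuple) with a name-to-group-id dict built once at module load; the function itself is loop-free: two O(1) lookups and an id comparison.
import Mathlib
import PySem

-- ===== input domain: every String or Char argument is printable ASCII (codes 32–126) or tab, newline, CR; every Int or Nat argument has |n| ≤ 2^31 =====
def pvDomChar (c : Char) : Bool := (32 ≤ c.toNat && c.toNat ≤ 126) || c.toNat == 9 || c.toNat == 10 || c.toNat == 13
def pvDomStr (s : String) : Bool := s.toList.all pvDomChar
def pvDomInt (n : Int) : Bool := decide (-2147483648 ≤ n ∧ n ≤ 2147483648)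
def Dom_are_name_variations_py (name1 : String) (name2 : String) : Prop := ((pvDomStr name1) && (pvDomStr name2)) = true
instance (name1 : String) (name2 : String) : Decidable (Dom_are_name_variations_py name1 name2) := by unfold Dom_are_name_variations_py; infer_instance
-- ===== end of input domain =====

-- B builds a name→group-id dictionary once and answers with two lookups; A scans each variation group per call (idiomatic/alternative, not claimed faster).

-- ===== PORT A =====
-- the literal set of variation tuples (tuples of differing length become lists)
def pvVariationsA : List (List String) :=
  [["usa", "united states", "united states of america"],
   ["uk", "united kingdom", "great britain"],
   ["ny", "new york"],
   ["ca", "california"],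
   ["dr", "doctor"],
   ["prof", "professor"]]

-- 'for variation_set in variations: if name1 in variation_set and name2 in variation_set: return True; return False'
def pvLoopA (name1 name2 : String) : List (List String) → Bool
  | [] => false
  | g :: rest => if g.contains name1 && g.contains name2 then true else pvLoopA name1 name2 rest

def are_name_variations_py (name1 : String) (name2 : String) : Bool :=
  pvLoopA name1 name2 pvVariationsA

-- ===== PORT B =====
def pvGroupsB : List (List String) :=
  [["usa", "united states", "united states of america"],
   ["uk", "united kingdom", "great britain"],
   ["ny", "new york"],
   ["ca", "california"],
   ["dr", "doctor"],
   ["prof", "professor"]]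

-- _NAME_TO_GROUP = {name: gid for gid, group in enumerate(_VARIATION_GROUPS) for name in group}
def pvNameToGroup : PySem.Dict String Int :=
  (PySem.List.enumerate pvGroupsB 0).foldl
    (fun d p => p.2.foldl (fun d name => d.insert name p.1) d)
    PySem.Dict.empty

def are_name_variations_py_alt (name1 : String) (name2 : String) : Bool :=
  match PySem.Dict.get? pvNameToGroup name1 with
  | none => false
  | some g1 => PySem.Dict.get? pvNameToGroup name2 == some g1

-- ===== PRECONDITION & SPEC =====
def Spec_are_name_variations_py (name1 : String) (name2 : String) (out : Bool) : Prop := out = are_name_variations_py_alt name1 name2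
instance (name1 : String) (name2 : String) (out : Bool) : Decidable (Spec_are_name_variations_py name1 name2 out) := by unfold Spec_are_name_variations_py; infer_instance

-- ===== CLAIM (what is proved, stated in full; the proofs are below) =====
def Claim_equal_are_name_variations_py : Prop := ∀ (name1 : String) (name2 : String), Dom_are_name_variations_py name1 name2 → Spec_are_name_variations_py name1 name2 (are_name_variations_py name1 name2)

-- ===== LEMMAS AND PROOFS =====

-- all names occurring in the table
def pvAllNames : List String :=
  ["usa", "united states", "united states of america",
   "uk", "united kingdom", "great britain",
   "ny", "new york", "ca", "california",
   "dr", "doctor", "prof", "professor"]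

-- a name outside the table is in no group and absent from the dictionary
theorem pvA_not_mem_left (n1 n2 : String) (h : n1 ∉ pvAllNames) :
    are_name_variations_py n1 n2 = false := by
  simp only [pvAllNames, List.mem_cons, not_or] at h
  obtain ⟨h1, h2, h3, h4, h5, h6, h7, h8, h9, h10, h11, h12, h13, h14, -⟩ := h
  simp only [are_name_variations_py, pvVariationsA, pvLoopA, List.contains_cons, List.contains_nil]
  simp [h1, h2, h3, h4, h5, h6, h7, h8, h9, h10, h11, h12, h13, h14]

theorem pvA_not_mem_right (n1 n2 : String) (h : n2 ∉ pvAllNames) :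
    are_name_variations_py n1 n2 = false := by
  simp only [pvAllNames, List.mem_cons, not_or] at h
  obtain ⟨h1, h2, h3, h4, h5, h6, h7, h8, h9, h10, h11, h12, h13, h14, -⟩ := h
  simp only [are_name_variations_py, pvVariationsA, pvLoopA, List.contains_cons, List.contains_nil]
  simp [h1, h2, h3, h4, h5, h6, h7, h8, h9, h10, h11, h12, h13, h14]

theorem pvB_get?_not_mem (n : String) (h : n ∉ pvAllNames) :
    PySem.Dict.get? pvNameToGroup n = none := by
  simp only [pvAllNames, List.mem_cons, not_or] at h
  obtain ⟨h1, h2, h3, h4, h5, h6, h7, h8, h9, h10, h11, h12, h13, h14, -⟩ := h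
  show PySem.Dict.get? pvNameToGroup n = none
  have : pvNameToGroup = PySem.Dict.mk
      [("usa", 0), ("united states", 0), ("united states of america", 0),
       ("uk", 1), ("united kingdom", 1), ("great britain", 1),
       ("ny", 2), ("new york", 2), ("ca", 3), ("california", 3),
       ("dr", 4), ("doctor", 4), ("prof", 5), ("professor", 5)] := by decide
  rw [this]
  simp [PySem.Dict.get?_mk_cons, Ne.symm h1, Ne.symm h2, Ne.symm h3, Ne.symm h4, Ne.symm h5, Ne.symm h6, Ne.symm h7, Ne.symm h8, Ne.symm h9, Ne.symm h10, Ne.symm h11, Ne.symm h12, Ne.symm h13, Ne.symm h14]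
  rfl

theorem pvMain (n1 n2 : String) :
    are_name_variations_py n1 n2 = are_name_variations_py_alt n1 n2 := by
  by_cases h1 : n1 ∈ pvAllNames
  · by_cases h2 : n2 ∈ pvAllNames
    · fin_cases h1 <;> fin_cases h2 <;> decide
    · rw [pvA_not_mem_right n1 n2 h2]
      unfold are_name_variations_py_alt
      rw [pvB_get?_not_mem n2 h2]
      cases PySem.Dict.get? pvNameToGroup n1 <;> simp
  · rw [pvA_not_mem_left n1 n2 h1]
    unfold are_name_variations_py_alt
    rw [pvB_get?_not_mem n1 h1]

-- ===== VERDICT (by name: the statement is the Claim_ definition above) =====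
theorem are_name_variations_py_spec : Claim_equal_are_name_variations_py := by
  intro n1 n2 _
  unfold Spec_are_name_variations_py
  exact pvMain n1 n2
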